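-- pv_equiv track=rewrite | github.com/HyoilKim/Ps | SW Expert Academy/problem1.py | solution
-- ===== SOURCE A (Python) =====
-- def solution(camels):
--     if len(camels) <= 2:
--         return camels[-1]
--     elif len(camels) == 3:
--         return sum(camels)
--     else:
--         return solution(camels[:-2]) + min(2*camels[0]+camels[-1]+camels[-2], \
--                                             camels[0]+2*camels[1]+camels[-1])
-- ===== SOURCE B (Python) =====
-- def solution(camels):
--     n = len(camels)
--     if n <= 2:
--         return camels[-1]
--     a0, a1 = camels[0], camels[1]
--     total = 0
--     m = n
--     while m >= 4:
--         total += min(2*a0 + camels[m-1] + camels[m-2], a0 + 2*a1 + camels[m-1])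
--         m -= 2
--     if m == 3:
--         return total + a0 + a1 + camels[2]
--     return total + a1
-- ===== Notes on version B (the rewrite author's own statement) =====
-- stated objective: faster
-- what changed: Replaced the O(n^2) recursion (each step copies camels[:-2]) by a single O(n) index loop from the end of the fixed list accumulating the min-cost terms.
import Mathlib
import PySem

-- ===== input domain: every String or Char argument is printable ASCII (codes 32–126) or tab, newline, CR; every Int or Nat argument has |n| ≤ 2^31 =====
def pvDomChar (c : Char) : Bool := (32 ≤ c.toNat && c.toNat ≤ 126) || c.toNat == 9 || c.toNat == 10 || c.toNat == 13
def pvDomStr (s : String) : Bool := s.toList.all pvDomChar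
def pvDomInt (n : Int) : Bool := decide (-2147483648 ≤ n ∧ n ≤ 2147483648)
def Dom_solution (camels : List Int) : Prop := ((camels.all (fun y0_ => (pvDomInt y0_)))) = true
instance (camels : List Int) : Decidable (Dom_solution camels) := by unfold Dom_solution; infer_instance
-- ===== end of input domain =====

-- B replaces A's slicing recursion by one index loop from the end: O(n) instead of O(n^2).

-- ===== PORT A =====
-- literal transliteration of A's recursion (camels[:-2] via PySem slice)
def solution (camels : List Int) : Int :=
  if camels.length ≤ 2 then (PySem.List.pyGet? camels (-1)).getD 0
  else if camels.length = 3 then camels.sum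
  else solution (PySem.List.slice camels none (some (-2))) +
    min (2 * (PySem.List.pyGet? camels 0).getD 0 + (PySem.List.pyGet? camels (-1)).getD 0
          + (PySem.List.pyGet? camels (-2)).getD 0)
        ((PySem.List.pyGet? camels 0).getD 0 + 2 * (PySem.List.pyGet? camels 1).getD 0
          + (PySem.List.pyGet? camels (-1)).getD 0)
termination_by camels.length
decreasing_by
  rw [PySem.List.slice_to_neg_ofNat camels 2 (by omega)]
  simp only [List.length_take]
  omega

-- ===== PORT B =====
-- the 'while m >= 4' loop of Source B, with its tail (the m == 3 / m == 2 cases)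
def solLoop (camels : List Int) (a0 a1 : Int) (m : Nat) (total : Int) : Int :=
  if m ≥ 4 then
    solLoop camels a0 a1 (m - 2)
      (total + min (2 * a0 + (PySem.List.pyGet? camels ((m : Int) - 1)).getD 0
                      + (PySem.List.pyGet? camels ((m : Int) - 2)).getD 0)
                   (a0 + 2 * a1 + (PySem.List.pyGet? camels ((m : Int) - 1)).getD 0))
  else if m = 3 then total + a0 + a1 + (PySem.List.pyGet? camels 2).getD 0
  else total + a1
termination_by m

def solution_alt (camels : List Int) : Int :=
  if camels.length ≤ 2 then (PySem.List.pyGet? camels (-1)).getD 0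
  else solLoop camels ((PySem.List.pyGet? camels 0).getD 0)
        ((PySem.List.pyGet? camels 1).getD 0) camels.length 0

-- ===== PRECONDITION & SPEC =====
-- Pre_ excludes only the empty list, on which A raises IndexError (camels[-1]).
def Pre_solution (camels : List Int) : Prop := camels ≠ []
instance (camels : List Int) : Decidable (Pre_solution camels) := by unfold Pre_solution; infer_instance
def pvWitness_solution : List Int := ([1, 2, 3, 4, 5] : List Int)

def Spec_solution (camels : List Int) (out : Int) : Prop := out = solution_alt camels
instance (camels : List Int) (out : Int) : Decidable (Spec_solution camels out) := by unfold Spec_solution; infer_instance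

-- ===== CLAIM (what is proved, stated in full; the proofs are below) =====
def Claim_equal_solution : Prop := ∀ (camels : List Int), Dom_solution camels → Pre_solution camels → Spec_solution camels (solution camels)

-- ===== LEMMAS AND PROOFS =====

-- index into a take: nonnegative index below m
theorem pyGet?_take_of_lt (xs : List Int) (m : Nat) (i : Nat) (hi : i < m) :
    PySem.List.pyGet? (xs.take m) (i : Int) = PySem.List.pyGet? xs (i : Int) := by
  simp [PySem.List.pyGet?_natCast, hi]

-- the accumulator of solLoop is additive
theorem solLoop_acc (camels : List Int) (a0 a1 : Int) (m : Nat) (t : Int) :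
    solLoop camels a0 a1 m t = t + solLoop camels a0 a1 m 0 := by
  induction m using Nat.strong_induction_on generalizing t with
  | _ m ih =>
    conv_lhs => rw [solLoop]
    conv_rhs => rw [solLoop]
    split_ifs with h4 h3
    · rw [ih (m - 2) (by omega), ih (m - 2) (by omega) (0 + _)]
      ring
    · ring
    · ring

theorem solution_take (camels : List Int) (m : Nat) (h2 : 2 ≤ m) (hm : m ≤ camels.length) :
    solution (camels.take m) =
      solLoop camels ((PySem.List.pyGet? camels 0).getD 0)
        ((PySem.List.pyGet? camels 1).getD 0) m 0 := by
  induction m using Nat.strong_induction_on with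
  | _ m ih =>
    have hlen : (camels.take m).length = m := by simp; omega
    by_cases h4 : 4 ≤ m
    · -- recursive case
      rw [solution]
      rw [if_neg (by omega), if_neg (by omega)]
      rw [PySem.List.slice_to_neg_ofNat (camels.take m) 2 (by omega)]
      rw [hlen, List.take_take, min_eq_left (by omega)]
      rw [ih (m - 2) (by omega) (by omega) (by omega)]
      conv_rhs => rw [solLoop]
      rw [if_pos (by omega)]
      conv_rhs => rw [solLoop_acc]
      have e0 : PySem.List.pyGet? (camels.take m) 0 = PySem.List.pyGet? camels 0 := by
        have := pyGet?_take_of_lt camels m 0 (by omega); simpa using this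
      have e1 : PySem.List.pyGet? (camels.take m) 1 = PySem.List.pyGet? camels 1 := by
        have := pyGet?_take_of_lt camels m 1 (by omega); simpa using this
      have em1 : PySem.List.pyGet? (camels.take m) (-1) = PySem.List.pyGet? camels ((m : Int) - 1) := by
        rw [PySem.List.pyGet?_neg_ofNat (camels.take m) 1 (by omega) (by omega)]
        have : ((m : Int) - 1) = ((m - 1 : Nat) : Int) := by omega
        rw [this, PySem.List.pyGet?_natCast, hlen, List.getElem?_take, if_pos (by omega)]
      have em2 : PySem.List.pyGet? (camels.take m) (-2) = PySem.List.pyGet? camels ((m : Int) - 2) := by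
        rw [PySem.List.pyGet?_neg_ofNat (camels.take m) 2 (by omega) (by omega)]
        have : ((m : Int) - 2) = ((m - 2 : Nat) : Int) := by omega
        rw [this, PySem.List.pyGet?_natCast, hlen, List.getElem?_take, if_pos (by omega)]
      rw [e0, e1, em1, em2]
      ring
    · -- base cases m = 2 or m = 3
      interval_cases m
      · -- m = 2
        rw [solution, if_pos (by omega)]
        rw [solLoop, if_neg (by omega), if_neg (by omega)]
        have := PySem.List.pyGet?_neg_ofNat (camels.take 2) 1 (by omega) (by omega)
        rw [show (-(1:Int)) = -((1:Nat):Int) by norm_num] at this ⊢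
        rw [this, hlen, List.getElem?_take, if_pos (by omega)]
        have h1 : PySem.List.pyGet? camels 1 = camels[1]? := by
          have := PySem.List.pyGet?_natCast camels 1; simpa using this
        rw [show ((2:Nat) - 1) = 1 by rfl, ← h1]
        ring
      · -- m = 3
        rw [solution, if_neg (by omega), if_pos hlen]
        rw [solLoop, if_neg (by omega), if_pos rfl]
        rcases camels with _ | ⟨c0, _ | ⟨c1, _ | ⟨c2, rest⟩⟩⟩
        · simp at hm
        · simp at hm
        · simp at hm
        · have g1 : PySem.List.pyGet? (c0 :: c1 :: c2 :: rest) 1 = some c1 := by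
            have := PySem.List.pyGet?_natCast (xs := c0 :: c1 :: c2 :: rest) (n := 1)
            simpa using this
          have g2 : PySem.List.pyGet? (c0 :: c1 :: c2 :: rest) 2 = some c2 := by
            have := PySem.List.pyGet?_natCast (xs := c0 :: c1 :: c2 :: rest) (n := 2)
            simpa using this
          rw [PySem.List.pyGet?_zero_cons, g1, g2]
          simp
          ring

theorem solution_spec : Claim_equal_solution := by
  intro camels _ hpre
  unfold Spec_solution solution_alt
  by_cases h2 : camels.length ≤ 2
  · rw [solution, if_pos h2, if_pos h2]
  · rw [if_neg h2, ← solution_take camels camels.length (by omega) (le_refl _),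
      List.take_length]
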